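-- pv_equiv track=rewrite | github.com/qjcina/GomokuBot | GomokuBot/GomokuBot/Algorithm/MenuGenerators/BrightnessMapGenerator.py | findPlayerButtons
-- ===== SOURCE A (Python) =====
-- def findPlayerButtons(height, iHorizontalAverage):
--     iPlayerButtonsStart = None
--     iPlayerButtonsEnd = None
--     iFollowingPoints = 0
--     for y in range(0,height):
--         if(iHorizontalAverage[y] > 50):
--             iFollowingPoints+=1
--             if(iFollowingPoints > 5 and iPlayerButtonsStart == None):
--                 iPlayerButtonsStart = y - 5
--         else:
--             if(iPlayerButtonsStart is not None):
--                 iPlayerButtonsEnd = y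
--             else:
--                 iFollowingPoints = 0
--     return iPlayerButtonsStart, iPlayerButtonsEnd
-- ===== SOURCE B (Python) =====
-- def findPlayerButtons(height, iHorizontalAverage):
--     # Pass 1: find the first index where six consecutive values exceed 50, with an early break.
--     start = None
--     run = 0
--     for y in range(height):
--         if iHorizontalAverage[y] > 50:
--             run += 1
--             if run == 6:
--                 start = y - 5
--                 break
--         else:
--             run = 0
--     if start is None:
--         return None, None
--     # Pass 2: the last index after the detected run whose value is <= 50 (None if there is none).
--     end = None
--     for y in range(start + 6, height):
--         if iHorizontalAverage[y] <= 50: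
--             end = y
--     return start, end
-- ===== Notes on version B (the rewrite author's own statement) =====
-- stated objective: alternative
-- what changed: Replaces A's single stateful pass carrying (start, end, run-counter) together with two separate passes: pass 1 scans for the first run of six bright values and breaks as soon as it is found; pass 2 scans only the indices after the detected run to pick the last value <= 50.
import Mathlib
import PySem

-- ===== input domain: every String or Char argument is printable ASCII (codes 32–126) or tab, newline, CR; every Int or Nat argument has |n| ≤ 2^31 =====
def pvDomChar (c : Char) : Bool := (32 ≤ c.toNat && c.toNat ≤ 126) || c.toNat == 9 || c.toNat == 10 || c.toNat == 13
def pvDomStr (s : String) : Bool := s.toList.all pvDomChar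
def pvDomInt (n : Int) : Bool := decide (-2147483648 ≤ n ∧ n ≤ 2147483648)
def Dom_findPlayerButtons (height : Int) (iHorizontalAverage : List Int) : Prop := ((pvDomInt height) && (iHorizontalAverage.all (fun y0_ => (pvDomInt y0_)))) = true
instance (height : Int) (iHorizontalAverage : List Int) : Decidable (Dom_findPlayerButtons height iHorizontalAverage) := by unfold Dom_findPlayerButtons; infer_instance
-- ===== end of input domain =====

-- B computes the same pair in two separate passes (find the run, then the last dim index after it)
-- instead of A's single pass carrying (start, end, counter); equivalence is about the return value.

-- ===== PORT A =====
-- one loop step of A; state = (iPlayerButtonsStart, iPlayerButtonsEnd, iFollowingPoints),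
-- wrapped in Option: none = the IndexError Python raises on an out-of-range xs[y] (excluded by Pre_)
def stepA (xs : List Int) (st : Option (Option Int × Option Int × Int)) (y : Int) :
    Option (Option Int × Option Int × Int) :=
  match st with
  | none => none
  | some (s, e, c) =>
    match PySem.List.pyGet? xs y with
    | none => none
    | some v =>
      if v > 50 then
        let c' := c + 1
        if c' > 5 ∧ s = none then some (some (y - 5), e, c') else some (s, e, c')
      else
        if s ≠ none then some (s, some y, c) else some (s, e, 0)

def findPlayerButtons (height : Int) (iHorizontalAverage : List Int) : Option Int × Option Int :=
  match (PySem.List.pyRange 0 height 1).foldl (stepA iHorizontalAverage) (some (none, none, 0)) with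
  | some (s, e, _) => (s, e)
  | none => (none, none)   -- unreachable under Pre_ (Python raises IndexError there)

-- ===== PORT B =====
-- pass 1: first index whose run of values > 50 reaches length 6 (early break);
-- on an out-of-range read (Python raises, excluded by Pre_) it stops with none
def altStart (xs : List Int) : List Int → Int → Option Int
  | [], _ => none
  | y :: ys, run =>
    match PySem.List.pyGet? xs y with
    | none => none
    | some v =>
      if v > 50 then
        if run + 1 = 6 then some (y - 5) else altStart xs ys (run + 1)
      else altStart xs ys 0

-- pass 2: last index in the given range whose value is ≤ 50 (out-of-range reads excluded by Pre_)
def altEnd (xs : List Int) (ys : List Int) : Option Int :=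
  ys.foldl (fun e y =>
    match PySem.List.pyGet? xs y with
    | some v => if v ≤ 50 then some y else e
    | none => e) none

def findPlayerButtons_alt (height : Int) (iHorizontalAverage : List Int) : Option Int × Option Int :=
  match altStart iHorizontalAverage (PySem.List.pyRange 0 height 1) 0 with
  | none => (none, none)
  | some s => (some s, altEnd iHorizontalAverage (PySem.List.pyRange (s + 6) height 1))

-- ===== PRECONDITION & SPEC =====
-- Pre_ excludes exactly the inputs where A raises IndexError: height larger than the list length.
def Pre_findPlayerButtons (height : Int) (iHorizontalAverage : List Int) : Prop :=
  height ≤ iHorizontalAverage.length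
instance (height : Int) (iHorizontalAverage : List Int) : Decidable (Pre_findPlayerButtons height iHorizontalAverage) := by unfold Pre_findPlayerButtons; infer_instance
def pvWitness_findPlayerButtons : Int × List Int := (8, [60, 60, 60, 60, 60, 60, 10, 60])

def Spec_findPlayerButtons (height : Int) (iHorizontalAverage : List Int) (out : Option Int × Option Int) : Prop := out = findPlayerButtons_alt height iHorizontalAverage
instance (height : Int) (iHorizontalAverage : List Int) (out : Option Int × Option Int) : Decidable (Spec_findPlayerButtons height iHorizontalAverage out) := by unfold Spec_findPlayerButtons; infer_instance

-- ===== CLAIM (what is proved, stated in full; the proofs are below) =====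
def Claim_equal_findPlayerButtons : Prop := ∀ (height : Int) (iHorizontalAverage : List Int), Dom_findPlayerButtons height iHorizontalAverage → Pre_findPlayerButtons height iHorizontalAverage → Spec_findPlayerButtons height iHorizontalAverage (findPlayerButtons height iHorizontalAverage)

-- ===== LEMMAS AND PROOFS =====

-- Phase 2: once A's start is set, the fold only keeps updating end with the last index of value ≤ 50,
-- which is exactly altEnd over the remaining indices.
theorem phase2 (xs : List Int) (ys : List Int) :
    ∀ (s : Int) (e : Option Int) (c : Int),
      (∀ y ∈ ys, PySem.List.pyGet? xs y ≠ none) →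
      ∃ c', ys.foldl (stepA xs) (some (some s, e, c)) =
        some (some s,
          ys.foldl (fun e y =>
            match PySem.List.pyGet? xs y with
            | some v => if v ≤ 50 then some y else e
            | none => e) e, c') := by
  induction ys with
  | nil => intro s e c _; exact ⟨c, rfl⟩
  | cons y ys ih =>
    intro s e c hget
    obtain ⟨v, hv⟩ := Option.ne_none_iff_exists'.mp (hget y (by simp))
    have hrest : ∀ y ∈ ys, PySem.List.pyGet? xs y ≠ none := fun z hz => hget z (by simp [hz])
    by_cases h50 : v > 50
    · have : ¬ (v ≤ 50) := by omega
      simpa [List.foldl, stepA, hv, h50, this] using ih s e (c + 1) hrest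
    · have : v ≤ 50 := by omega
      simpa [List.foldl, stepA, hv, h50, this] using ih s (some y) c hrest

-- Phase 1: while start is unset, A's fold and B's altStart track the same run counter;
-- when the run reaches 6 at index y the fold enters phase 2 on the tail pyRange (y+1) b 1,
-- which is exactly B's pass-2 range since start = y - 5.
theorem phase1 (xs : List Int) :
    ∀ (n : Nat) (a c : Int), c ≤ 5 →
      (∀ y, a ≤ y → y < a + n → PySem.List.pyGet? xs y ≠ none) →
      (match altStart xs (PySem.List.pyRange a (a + n) 1) c with
       | some s => ∃ c', (PySem.List.pyRange a (a + n) 1).foldl (stepA xs) (some (none, none, c)) =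
            some (some s, altEnd xs (PySem.List.pyRange (s + 6) (a + n) 1), c')
       | none => ∃ c', (PySem.List.pyRange a (a + n) 1).foldl (stepA xs) (some (none, none, c)) =
            some (none, none, c')) := by
  intro n
  induction n with
  | zero =>
    intro a c _ _
    simp [altStart]
  | succ n ih =>
    intro a c hc hget
    have hcons := PySem.List.pyRange_one_cons (a := a) (b := a + (n + 1 : Nat)) (by push_cast; omega)
    have htop : a + ((n + 1 : Nat) : Int) = (a + 1) + (n : Nat) := by push_cast; omega
    obtain ⟨v, hv⟩ := Option.ne_none_iff_exists'.mp (hget a (le_refl a) (by push_cast; omega))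
    have hrest : ∀ y, a + 1 ≤ y → y < (a + 1) + (n : Nat) → PySem.List.pyGet? xs y ≠ none := by
      intro y h1 h2; exact hget y (by omega) (by push_cast at h2 ⊢; omega)
    by_cases h50 : v > 50
    · by_cases h6 : c + 1 = 6
      · -- the run reaches 6 at index a: start = a - 5, A enters phase 2 on the tail
        have htail : ∀ y ∈ PySem.List.pyRange (a + 1) (a + ((n+1:Nat):Int)) 1,
            PySem.List.pyGet? xs y ≠ none := by
          intro y hy
          rw [PySem.List.mem_pyRange_one] at hy
          exact hget y (by omega) hy.2
        obtain ⟨c', hfold⟩ := phase2 xs (PySem.List.pyRange (a + 1) (a + ((n+1:Nat):Int)) 1)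
          (a - 5) none (c + 1) htail
        rw [hcons]
        simp only [altStart, hv, if_pos h50, if_pos h6, List.foldl]
        have hstep : stepA xs (some (none, none, c)) a = some (some (a - 5), none, c + 1) := by
          simp [stepA, hv, h50]; omega
        rw [hstep, hfold]
        have : a - 5 + 6 = a + 1 := by omega
        rw [this]
        exact ⟨c', rfl⟩
      · -- run continues: both sides recurse with counter c + 1
        have hc' : c + 1 ≤ 5 := by omega
        have := ih (a + 1) (c + 1) hc' hrest
        rw [← htop] at this
        rw [hcons]
        have hstep : stepA xs (some (none, none, c)) a = some (none, none, c + 1) := by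
          simp [stepA, hv, h50]; omega
        simpa only [altStart, hv, if_pos h50, if_neg h6, List.foldl, hstep] using this
    · -- dim value: both sides reset the counter to 0
      have := ih (a + 1) 0 (by omega) hrest
      rw [← htop] at this
      rw [hcons]
      have hstep : stepA xs (some (none, none, c)) a = some (none, none, 0) := by
        simp [stepA, hv, h50]
      simpa only [altStart, hv, if_neg h50, List.foldl, hstep] using this

-- ===== VERDICT (by name: the statement is the Claim_ definition above) =====
theorem findPlayerButtons_spec : Claim_equal_findPlayerButtons := by
  intro h xs _ hpre
  unfold Spec_findPlayerButtons findPlayerButtons findPlayerButtons_alt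
  by_cases hpos : 0 < h
  · have hn : h = 0 + ((h.toNat : Nat) : Int) := by omega
    have hget : ∀ y, (0:Int) ≤ y → y < 0 + (h.toNat : Int) → PySem.List.pyGet? xs y ≠ none := by
      intro y h1 h2
      rw [Ne, PySem.List.pyGet?_eq_none_iff, PySem.Raise.InRange]
      push Not
      constructor
      · omega
      · have : (h.toNat : Int) ≤ xs.length := by
          unfold Pre_findPlayerButtons at hpre; omega
        omega
    have := phase1 xs h.toNat 0 0 (by omega) hget
    rw [← hn] at this
    cases hstart : altStart xs (PySem.List.pyRange 0 h 1) 0 with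
    | none =>
      rw [hstart] at this
      obtain ⟨c', hfold⟩ := this
      rw [hfold]
    | some s =>
      rw [hstart] at this
      obtain ⟨c', hfold⟩ := this
      rw [hfold]
  · have : PySem.List.pyRange 0 h 1 = [] := PySem.List.pyRange_one_eq_nil (by omega)
    simp [this, altStart]
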